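-- pv_equiv track=rewrite | github.com/wanwanaa/transformer | utils/dict.py | index2sentence
-- ===== SOURCE A (Python) =====
-- def index2sentence(index, idx2word):
--     sen = []
--     for i in range(len(index)):
--         if idx2word[index[i]] == '<eos>':
--             break
--         if idx2word[index[i]] == '<bos>':
--             continue
--         else:
--             sen.append(idx2word[index[i]])
--     if len(sen) == 0:
--         sen.append('<unk>')
--     return sen
-- ===== SOURCE B (Python) =====
-- def index2sentence(index, idx2word):
--     # Two staged passes instead of A's single fused loop: pass 1 only locates
--     # the cut position of the first '<eos>'; pass 2 independently translates
--     # and filters the prefix before the cut; then an or-else fallback.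
--     cut = len(index)
--     for pos, i in enumerate(index):
--         if idx2word[i] == '<eos>':
--             cut = pos
--             break
--     words = [idx2word[i] for i in index[:cut] if idx2word[i] != '<bos>']
--     return words if words else ['<unk>']
-- ===== Notes on version B (the rewrite author's own statement) =====
-- stated objective: alternative
-- what changed: Replaces A's single fused loop (mutable accumulator with break and continue) by two independent staged passes: pass 1 only finds the cut position of the first '<eos>', pass 2 re-translates and filters the prefix before the cut, with an or-else fallback; it trades a second lookup pass over the prefix for the staged decomposition.
import Mathlib
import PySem

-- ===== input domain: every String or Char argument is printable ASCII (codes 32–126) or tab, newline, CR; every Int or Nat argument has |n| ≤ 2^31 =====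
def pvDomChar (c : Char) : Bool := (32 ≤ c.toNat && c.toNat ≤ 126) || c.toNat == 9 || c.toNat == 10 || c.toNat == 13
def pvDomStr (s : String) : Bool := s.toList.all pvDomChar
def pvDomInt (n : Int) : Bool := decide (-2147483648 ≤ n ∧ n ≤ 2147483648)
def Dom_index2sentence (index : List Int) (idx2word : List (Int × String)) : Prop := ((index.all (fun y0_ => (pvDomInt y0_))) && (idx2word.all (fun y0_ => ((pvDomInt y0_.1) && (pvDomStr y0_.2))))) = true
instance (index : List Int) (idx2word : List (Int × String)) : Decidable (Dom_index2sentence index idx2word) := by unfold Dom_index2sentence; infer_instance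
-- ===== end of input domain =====

-- B differs from A in decomposition only (two staged passes vs one fused loop); same values on Pre_.

-- ===== PORT A =====
-- Port of A: indexed loop over range(len(index)) with accumulator `sen`,
-- break on '<eos>', continue on '<bos>'; a missing key (Python KeyError) is
-- outside Pre_ below, the port returns the accumulator there.
def index2sentenceGo (index : List Int) (idx2word : List (Int × String)) (i : Nat) (sen : List String) : List String :=
  if h : i < index.length then
    match idx2word.lookup index[i] with
    | none => sen  -- KeyError: excluded by Pre_index2sentence
    | some w =>
      if w = "<eos>" then sen
      else if w = "<bos>" then index2sentenceGo index idx2word (i + 1) sen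
      else index2sentenceGo index idx2word (i + 1) (sen ++ [w])
  else sen
termination_by index.length - i

def index2sentence (index : List Int) (idx2word : List (Int × String)) : List String :=
  let sen := index2sentenceGo index idx2word 0 []
  if sen.length = 0 then sen ++ ["<unk>"] else sen

-- ===== PORT B =====
-- Port of B, pass 1: the enumerate loop that only finds the cut position of the
-- first '<eos>' (default: the whole length); a missing key (Python KeyError,
-- outside Pre_) stops with cut at that position.
def findCut (idx2word : List (Int × String)) : List Int → Nat
  | [] => 0
  | i :: rest =>
    match idx2word.lookup i with
    | none => 0  -- KeyError: excluded by Pre_index2sentence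
    | some w => if w = "<eos>" then 0 else findCut idx2word rest + 1

-- Port of B, pass 2 + fallback: translate and filter the prefix before the cut
-- (`idx2word[i]` on the prefix is always present under Pre_; getD "" stands for
-- the excluded KeyError and is never reached on the prefix the port takes).
def index2sentence_alt (index : List Int) (idx2word : List (Int × String)) : List String :=
  let cut := findCut idx2word index
  let words := ((index.take cut).map (fun i => (idx2word.lookup i).getD "")).filter (fun w => w ≠ "<bos>")
  if words = [] then ["<unk>"] else words

-- ===== PRECONDITION & SPEC =====
-- Pre_ excludes exactly the inputs where Python A raises KeyError: some index
-- looked up before the loop breaks at the first '<eos>' is missing from idx2word.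
def Pre_index2sentence (index : List Int) (idx2word : List (Int × String)) : Prop :=
  ∀ i < index.length,
    (∀ j < i, idx2word.lookup (index.getD j 0) ≠ some "<eos>") →
    (idx2word.lookup (index.getD i 0)).isSome
instance (index : List Int) (idx2word : List (Int × String)) : Decidable (Pre_index2sentence index idx2word) := by unfold Pre_index2sentence; infer_instance

def pvWitness_index2sentence : List Int × (List (Int × String)) :=
  ([0, 1, 2, 0], [(0, "<bos>"), (1, "hi"), (2, "<eos>")])

def Spec_index2sentence (index : List Int) (idx2word : List (Int × String)) (out : List String) : Prop := out = index2sentence_alt index idx2word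
instance (index : List Int) (idx2word : List (Int × String)) (out : List String) : Decidable (Spec_index2sentence index idx2word out) := by unfold Spec_index2sentence; infer_instance

-- ===== CLAIM (what is proved, stated in full; the proofs are below) =====
def Claim_equal_index2sentence : Prop := ∀ (index : List Int) (idx2word : List (Int × String)), Dom_index2sentence index idx2word → Pre_index2sentence index idx2word → Spec_index2sentence index idx2word (index2sentence index idx2word)

-- ===== LEMMAS AND PROOFS =====

-- B's core result on a suffix: translate-and-filter the prefix before the cut.
def altCore (idx2word : List (Int × String)) (xs : List Int) : List String :=
  ((xs.take (findCut idx2word xs)).map (fun i => (idx2word.lookup i).getD "")).filter (fun w => w ≠ "<bos>")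

-- altCore on a cons, following findCut's branches.
theorem altCore_cons (d : List (Int × String)) (i : Int) (xs : List Int) :
    altCore d (i :: xs) =
      match d.lookup i with
      | none => []
      | some w => if w = "<eos>" then [] else if w = "<bos>" then altCore d xs else w :: altCore d xs := by
  cases hl : d.lookup i with
  | none => simp [altCore, findCut, hl]
  | some w =>
    by_cases he : w = "<eos>"
    · simp [altCore, findCut, hl, he]
    · simp only [altCore, findCut, hl, if_neg he, List.take_succ_cons, List.map_cons, List.filter_cons, hl]
      by_cases hb : w = "<bos>" <;> simp [he, hb]

-- Loop invariant: A's accumulator loop from position i equals `sen` followed by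
-- B's two-pass result on the remaining indices (holds on all inputs; Pre_ only
-- marks where the Pythons return at all).
theorem index2sentenceGo_eq (index : List Int) (d : List (Int × String)) :
    ∀ n i sen, index.length - i = n →
      index2sentenceGo index d i sen = sen ++ altCore d (index.drop i) := by
  intro n
  induction n with
  | zero =>
    intro i sen h
    have hge : index.length ≤ i := by omega
    rw [index2sentenceGo, dif_neg (by omega), List.drop_of_length_le hge]
    simp [altCore, findCut]
  | succ n ih =>
    intro i sen h
    have hi : i < index.length := by omega
    have hdrop : index.drop i = index[i] :: index.drop (i + 1) :=
      List.drop_eq_getElem_cons hi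
    rw [index2sentenceGo, dif_pos hi, hdrop, altCore_cons]
    cases hl : d.lookup index[i] with
    | none => simp [hl]
    | some w =>
      by_cases he : w = "<eos>"
      · simp [hl, he]
      · by_cases hb : w = "<bos>"
        · have hrec := ih (i + 1) sen (by omega)
          simp [hl, he, hb, hrec]
        · have hrec := ih (i + 1) (sen ++ [w]) (by omega)
          simp [hl, he, hb, hrec]

-- ===== VERDICT (by name: the statement is the Claim_ definition above) =====
theorem index2sentence_spec : Claim_equal_index2sentence := by
  intro index idx2word _ _
  unfold Spec_index2sentence index2sentence index2sentence_alt
  rw [index2sentenceGo_eq index idx2word (index.length - 0) 0 [] rfl]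
  rw [List.drop_zero, List.nil_append]
  show (if (altCore idx2word index).length = 0 then _ else _) = _
  rcases eq_or_ne (altCore idx2word index) [] with hf | hf
  · have hf' := hf; simp only [altCore] at hf'
    rw [hf]; simp only [List.length_nil, if_pos rfl, List.nil_append, hf', if_pos rfl]
  · have h1 : ¬ (altCore idx2word index).length = 0 := by
      simpa [List.length_eq_zero_iff] using hf
    rw [if_neg h1]
    simp only [altCore] at hf ⊢
    rw [if_neg hf]
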